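-- pv_equiv track=rewrite | github.com/JuicyBurger/roc-time-bio-tagging | src/roc_time_parser/extractor/dataset.py | char_bio_labels
-- ===== SOURCE A (Python) =====
-- from typing import Any, Iterable, TYPE_CHECKING
--
-- def char_bio_labels(text: str, spans: Iterable[dict[str, Any]]) -> list[str]:
--     labels = ["O"] * len(text)
--     for sp in spans:
--         start = int(sp["start"])
--         end = int(sp["end"])
--         lab = sp.get("label", "TIME")
--         if lab != "TIME":
--             continue
--         if not (0 <= start < end <= len(text)):
--             raise ValueError(f"Span out of bounds: {start}:{end} for len={len(text)}")
--         # Overlap check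
--         if any(labels[i] != "O" for i in range(start, end)):
--             raise ValueError(f"Overlapping TIME span at {start}:{end}")
--         labels[start] = "B-TIME"
--         for i in range(start + 1, end):
--             labels[i] = "I-TIME"
--     return labels
-- ===== SOURCE B (Python) =====
-- from typing import Any, Iterable
--
-- def char_bio_labels(text: str, spans: Iterable[dict[str, Any]]) -> list[str]:
--     accepted: list[tuple[int, int]] = []
--     for sp in spans:
--         start = int(sp["start"])
--         end = int(sp["end"])
--         lab = sp.get("label", "TIME")
--         if lab != "TIME":
--             continue
--         if not (0 <= start < end <= len(text)):
--             raise ValueError(f"Span out of bounds: {start}:{end} for len={len(text)}")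
--         if any(s < end and start < e for (s, e) in accepted):
--             raise ValueError(f"Overlapping TIME span at {start}:{end}")
--         accepted.append((start, end))
--
--     def classify(i: int) -> str:
--         for (s, e) in accepted:
--             if i == s:
--                 return "B-TIME"
--             if s < i < e:
--                 return "I-TIME"
--         return "O"
--
--     return [classify(i) for i in range(len(text))]
-- ===== Notes on version B (the rewrite author's own statement) =====
-- stated objective: alternative
-- what changed: B never mutates a labels array: it validates spans against a list of already-accepted (start,end) intervals using interval-overlap arithmetic instead of scanning labels, and then builds the output in one final pass that classifies each character position against the accepted intervals.
import Mathlib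
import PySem

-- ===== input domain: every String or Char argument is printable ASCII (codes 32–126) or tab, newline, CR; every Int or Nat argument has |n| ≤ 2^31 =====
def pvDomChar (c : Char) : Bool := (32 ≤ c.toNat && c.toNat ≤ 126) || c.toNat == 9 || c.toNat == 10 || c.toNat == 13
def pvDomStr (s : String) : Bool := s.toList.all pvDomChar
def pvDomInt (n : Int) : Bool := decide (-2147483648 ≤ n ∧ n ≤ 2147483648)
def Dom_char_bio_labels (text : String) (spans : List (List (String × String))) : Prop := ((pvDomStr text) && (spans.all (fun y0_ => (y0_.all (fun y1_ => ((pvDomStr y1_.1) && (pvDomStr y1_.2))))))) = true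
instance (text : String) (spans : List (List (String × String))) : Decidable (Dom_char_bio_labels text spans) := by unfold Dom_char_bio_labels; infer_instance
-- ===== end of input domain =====

-- B replaces A's labels-array mutation by interval bookkeeping: overlap is tested against the
-- accepted (start,end) intervals and the output is built in one final per-character classification pass.


-- shared by both ports: start = int(sp["start"]); end = int(sp["end"]); lab = sp.get("label", "TIME")
-- (none = KeyError from sp["…"] or ValueError from int(…))
def pvParseSpan (sp : List (String × String)) : Option (Int × Int × String) :=
  match (PySem.Dict.mk sp).get? "start" with
  | none => none
  | some s0 =>
    match PySem.Int.ofStr? s0 with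
    | none => none
    | some s =>
      match (PySem.Dict.mk sp).get? "end" with
      | none => none
      | some e0 =>
        match PySem.Int.ofStr? e0 with
        | none => none
        | some e => some (s, e, (PySem.Dict.mk sp).getD "label" "TIME")

-- ===== PORT A =====
-- for i in range(start+1, end): labels[i] = "I-TIME"
def pvFillA (labels : List String) (s e : Int) : List String :=
  (PySem.List.pyRange (s + 1) e 1).foldl (fun ls i => PySem.List.pySetD ls i "I-TIME") labels

-- the span loop; none = the raised ValueError
def pvLoopA (n : Int) (labels : List String) : List (List (String × String)) → Option (List String)
  | [] => some labels
  | sp :: rest =>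
    match pvParseSpan sp with
    | none => none
    | some (s, e, lab) =>
      if lab ≠ "TIME" then pvLoopA n labels rest
      else if ¬ (0 ≤ s ∧ s < e ∧ e ≤ n) then none
      else if (PySem.List.pyRange s e 1).any
          (fun i => PySem.List.pyGetD labels i "O" ≠ "O") then none
      else pvLoopA n (pvFillA (PySem.List.pySetD labels s "B-TIME") s e) rest

def char_bio_labels (text : String) (spans : List (List (String × String))) : List String :=
  (pvLoopA (PySem.Str.len text)
    (PySem.List.pyRepeat ["O"] (PySem.Str.len text)) spans).getD []

-- ===== PORT B =====
-- the validation loop over accepted intervals; none = the raised ValueError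
def pvLoopB (n : Int) (accepted : List (Int × Int)) : List (List (String × String)) → Option (List (Int × Int))
  | [] => some accepted
  | sp :: rest =>
    match pvParseSpan sp with
    | none => none
    | some (s, e, lab) =>
      if lab ≠ "TIME" then pvLoopB n accepted rest
      else if ¬ (0 ≤ s ∧ s < e ∧ e ≤ n) then none
      else if accepted.any (fun q => q.1 < e && s < q.2) then none
      else pvLoopB n (accepted ++ [(s, e)]) rest

-- def classify(i): first matching accepted interval decides the tag
def pvClassify (i : Int) : List (Int × Int) → String
  | [] => "O"
  | (s, e) :: t => if i = s then "B-TIME" else if s < i ∧ i < e then "I-TIME" else pvClassify i t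

def char_bio_labels_alt (text : String) (spans : List (List (String × String))) : List String :=
  match pvLoopB (PySem.Str.len text) [] spans with
  | none => []
  | some acc => (PySem.List.pyRange 0 (PySem.Str.len text) 1).map (fun i => pvClassify i acc)

-- ===== PRECONDITION & SPEC =====
-- a span is fine if its keys parse and, when its label is TIME, it is within bounds
def pvSpanOK (n : Int) (sp : List (String × String)) : Bool :=
  match pvParseSpan sp with
  | none => false
  | some (s, e, lab) => lab ≠ "TIME" || (0 ≤ s && s < e && e ≤ n)

-- the (start,end) pairs of the TIME spans, in order
def pvTimeIvs (spans : List (List (String × String))) : List (Int × Int) :=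
  spans.filterMap (fun sp =>
    match pvParseSpan sp with
    | some (s, e, lab) => if lab = "TIME" then some (s, e) else none
    | none => none)

-- Pre_ excludes exactly the inputs on which A raises: KeyError/ValueError while parsing a span,
-- an out-of-bounds TIME span, or two overlapping TIME spans.
def Pre_char_bio_labels (text : String) (spans : List (List (String × String))) : Prop :=
  (∀ sp ∈ spans, pvSpanOK (PySem.Str.len text) sp = true) ∧
  (pvTimeIvs spans).Pairwise (fun p q => p.2 ≤ q.1 ∨ q.2 ≤ p.1)
instance (text : String) (spans : List (List (String × String))) : Decidable (Pre_char_bio_labels text spans) := by unfold Pre_char_bio_labels; infer_instance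

def pvWitness_char_bio_labels : String × (List (List (String × String))) :=
  ("ab cd", [[("start", "0"), ("end", "2")], [("start", "3"), ("end", "5"), ("label", "TIME")], [("start", "9"), ("end", "1"), ("label", "LOC")]])

def Spec_char_bio_labels (text : String) (spans : List (List (String × String))) (out : List String) : Prop := out = char_bio_labels_alt text spans
instance (text : String) (spans : List (List (String × String))) (out : List String) : Decidable (Spec_char_bio_labels text spans out) := by unfold Spec_char_bio_labels; infer_instance

-- ===== CLAIM (what is proved, stated in full; the proofs are below) =====
def Claim_equal_char_bio_labels : Prop := ∀ (text : String) (spans : List (List (String × String))), Dom_char_bio_labels text spans → Pre_char_bio_labels text spans → Spec_char_bio_labels text spans (char_bio_labels text spans)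

-- ===== LEMMAS AND PROOFS =====

-- B's final pass, as a function of the accepted intervals
def pvRender (n : Int) (acc : List (Int × Int)) : List String :=
  (PySem.List.pyRange 0 n 1).map (fun i => pvClassify i acc)

theorem pvClassify_append (i : Int) (a b : List (Int × Int)) :
    pvClassify i (a ++ b) = if pvClassify i a = "O" then pvClassify i b else pvClassify i a := by
  induction a with
  | nil => simp [pvClassify]
  | cons q t ih =>
    obtain ⟨s, e⟩ := q
    by_cases h1 : i = s <;> by_cases h2 : s < i ∧ i < e <;>
      simp [pvClassify, h1, h2, ih]

theorem pvClassify_eq_O_iff (i : Int) (acc : List (Int × Int))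
    (hb : ∀ q ∈ acc, q.1 < q.2) :
    pvClassify i acc = "O" ↔ ∀ q ∈ acc, ¬ (q.1 ≤ i ∧ i < q.2) := by
  induction acc with
  | nil => simp [pvClassify]
  | cons q t ih =>
    obtain ⟨s, e⟩ := q
    have hse : s < e := hb (s, e) (by simp)
    have ih' := ih (fun q hq => hb q (List.mem_cons_of_mem _ hq))
    unfold pvClassify
    by_cases h1 : i = s
    · rw [if_pos h1]
      constructor
      · intro h; exact absurd h (by decide)
      · intro h; exact absurd (h (s, e) (by simp)) (by dsimp; omega)
    · rw [if_neg h1]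
      by_cases h2 : s < i ∧ i < e
      · rw [if_pos h2]
        constructor
        · intro h; exact absurd h (by decide)
        · intro h; exact absurd (h (s, e) (by simp)) (by dsimp; omega)
      · rw [if_neg h2, ih']
        constructor
        · intro h q hq
          rcases List.mem_cons.mp hq with rfl | hq'
          · dsimp; omega
          · exact h q hq'
        · intro h q hq; exact h q (List.mem_cons_of_mem _ hq)

theorem length_fillLoop (labels : List String) (r : List Int) :
    (r.foldl (fun ls i => PySem.List.pySetD ls i "I-TIME") labels).length = labels.length := by
  induction r generalizing labels with
  | nil => rfl
  | cons x t ih => simp [List.foldl_cons, ih, PySem.List.length_pySetD]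

theorem pyGetD_pySetD_int (xs : List String) (a i : Int) (v : String) (ha : 0 ≤ a)
    (h0 : 0 ≤ i) (hl : i < (xs.length : Int)) :
    PySem.List.pyGetD (PySem.List.pySetD xs a v) i "O" =
      if i = a then v else PySem.List.pyGetD xs i "O" := by
  rw [PySem.List.pySetD_of_nonneg xs v ha,
    PySem.List.pyGetD_eq_getElem _ "O" h0 (by rw [List.length_set]; exact hl),
    List.getElem_set]
  by_cases h : i = a
  · rw [if_pos (by omega), if_pos h]
  · rw [if_neg (by omega), if_neg h, PySem.List.pyGetD_eq_getElem _ "O" h0 hl]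

theorem pyGetD_fillLoop (labels : List String) (a e : Int) (ha : 0 ≤ a)
    (he : e ≤ (labels.length : Int)) (i : Int) (h0 : 0 ≤ i) (hlen : i < (labels.length : Int)) :
    PySem.List.pyGetD
        ((PySem.List.pyRange a e 1).foldl (fun ls j => PySem.List.pySetD ls j "I-TIME") labels) i "O" =
      if a ≤ i ∧ i < e then "I-TIME" else PySem.List.pyGetD labels i "O" := by
  by_cases hae : a < e
  · rw [PySem.List.pyRange_one_cons hae, List.foldl_cons]
    have hrec := pyGetD_fillLoop (PySem.List.pySetD labels a "I-TIME") (a + 1) e (by omega)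
      (by rw [PySem.List.length_pySetD]; exact he) i h0
      (by rw [PySem.List.length_pySetD]; exact hlen)
    rw [hrec, pyGetD_pySetD_int labels a i "I-TIME" ha h0 hlen]
    split_ifs <;> first | rfl | omega
  · rw [PySem.List.pyRange_one_eq_nil (by omega), List.foldl_nil, if_neg (by omega)]
termination_by (e - a).toNat
decreasing_by omega

theorem length_pvRender (n : Int) (acc : List (Int × Int)) :
    (pvRender n acc).length = n.toNat := by
  simp [pvRender, PySem.List.length_pyRange_one]

theorem pyGetD_pvRender (n : Int) (acc : List (Int × Int)) (i : Int)
    (h0 : 0 ≤ i) (h1 : i < n) :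
    PySem.List.pyGetD (pvRender n acc) i "O" = pvClassify i acc := by
  exact PySem.List.pyGetD_map_pyRange_of_nonneg _ _ _ _ h0 h1

theorem ext_pyGetD (xs ys : List String) (hlen : xs.length = ys.length)
    (h : ∀ i : Int, 0 ≤ i → i < (xs.length : Int) →
      PySem.List.pyGetD xs i "O" = PySem.List.pyGetD ys i "O") : xs = ys := by
  apply List.ext_getElem hlen
  intro k h1 h2
  have hk := h k (by omega) (by exact_mod_cast h1)
  rw [PySem.List.pyGetD_natCast, PySem.List.pyGetD_natCast,
    List.getD_eq_getElem _ _ h1, List.getD_eq_getElem _ _ h2] at hk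
  exact hk

-- filling the fresh span into the rendering of acc renders acc ++ [(s,e)]
theorem fill_render (n s e : Int) (acc : List (Int × Int))
    (hs : 0 ≤ s) (hse : s < e) (hen : e ≤ n)
    (hb : ∀ q ∈ acc, q.1 < q.2)
    (hdisj : ∀ q ∈ acc, e ≤ q.1 ∨ q.2 ≤ s) :
    pvFillA (PySem.List.pySetD (pvRender n acc) s "B-TIME") s e =
      pvRender n (acc ++ [(s, e)]) := by
  have hOacc : ∀ i : Int, s ≤ i → i < e → pvClassify i acc = "O" := by
    intro i hi1 hi2
    rw [pvClassify_eq_O_iff i acc hb]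
    intro q hq; have := hdisj q hq; omega
  apply ext_pyGetD
  · unfold pvFillA
    rw [length_fillLoop, PySem.List.length_pySetD, length_pvRender, length_pvRender]
  · intro i h0 h1
    have hlenL : (pvFillA (PySem.List.pySetD (pvRender n acc) s "B-TIME") s e).length = n.toNat := by
      unfold pvFillA
      rw [length_fillLoop, PySem.List.length_pySetD, length_pvRender]
    rw [hlenL] at h1
    have hn1 : i < n := by omega
    unfold pvFillA
    rw [pyGetD_fillLoop _ (s + 1) e (by omega)
      (by rw [PySem.List.length_pySetD, length_pvRender]; omega) i h0
      (by rw [PySem.List.length_pySetD, length_pvRender]; omega)]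
    rw [pyGetD_pySetD_int _ s i "B-TIME" hs h0 (by rw [length_pvRender]; omega)]
    rw [pyGetD_pvRender n acc i h0 hn1, pyGetD_pvRender n (acc ++ [(s, e)]) i h0 hn1,
      pvClassify_append]
    by_cases hI : s + 1 ≤ i ∧ i < e
    · rw [if_pos hI, hOacc i (by omega) (by omega), if_pos rfl]
      unfold pvClassify
      rw [if_neg (by omega), if_pos (by omega)]
    · rw [if_neg hI]
      by_cases hB : i = s
      · rw [if_pos hB, hOacc i (by omega) (by omega), if_pos rfl]
        unfold pvClassify
        rw [if_pos hB]
      · rw [if_neg hB]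
        by_cases hO : pvClassify i acc = "O"
        · rw [if_pos hO, hO]
          unfold pvClassify
          rw [if_neg hB, if_neg (by omega)]
          rfl
        · rw [if_neg hO]

-- the two overlap guards agree
theorem guard_agree (n s e : Int) (acc : List (Int × Int))
    (hs : 0 ≤ s) (hse : s < e) (hen : e ≤ n)
    (hb : ∀ q ∈ acc, 0 ≤ q.1 ∧ q.1 < q.2 ∧ q.2 ≤ n) :
    ((PySem.List.pyRange s e 1).any
        (fun i => PySem.List.pyGetD (pvRender n acc) i "O" ≠ "O")) =
      acc.any (fun q => q.1 < e && s < q.2) := by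
  have hbO : ∀ q ∈ acc, q.1 < q.2 := fun q hq => (hb q hq).2.1
  have hcongr : ∀ i ∈ PySem.List.pyRange s e 1,
      (decide (PySem.List.pyGetD (pvRender n acc) i "O" ≠ "O")) =
        (decide (pvClassify i acc ≠ "O")) := by
    intro i hi
    rw [PySem.List.mem_pyRange_one] at hi
    rw [pyGetD_pvRender n acc i (by omega) (by omega)]
  rw [PySem.List.any_congr_mem hcongr]
  rw [Bool.eq_iff_iff]
  simp only [List.any_eq_true, PySem.List.mem_pyRange_one, decide_eq_true_eq,
    Bool.and_eq_true, decide_eq_true_eq]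
  constructor
  · rintro ⟨i, ⟨hi1, hi2⟩, hne⟩
    have := (not_iff_not.mpr (pvClassify_eq_O_iff i acc hbO)).mp hne
    push_neg at this
    obtain ⟨q, hq, hc⟩ := this
    exact ⟨q, hq, by omega, by omega⟩
  · rintro ⟨q, hq, h1, h2⟩
    have hqb := hb q hq
    refine ⟨max s q.1, ⟨by omega, by omega⟩, ?_⟩
    rw [ne_eq, pvClassify_eq_O_iff _ acc hbO]
    push_neg
    exact ⟨q, hq, by omega, by omega⟩

-- main invariant: A's loop on the rendering of acc tracks B's loop on acc
theorem loop_agree (n : Int) (spans : List (List (String × String))) :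
    ∀ acc : List (Int × Int),
    (∀ q ∈ acc, 0 ≤ q.1 ∧ q.1 < q.2 ∧ q.2 ≤ n) →
    (∀ sp ∈ spans, pvSpanOK n sp = true) →
    ((acc ++ pvTimeIvs spans).Pairwise (fun p q => p.2 ≤ q.1 ∨ q.2 ≤ p.1)) →
    pvLoopA n (pvRender n acc) spans = (pvLoopB n acc spans).map (pvRender n) := by
  induction spans with
  | nil => intro acc _ _ _; simp [pvLoopA, pvLoopB]
  | cons sp rest ih =>
    intro acc hb hok hpw
    have hsp := hok sp (by simp)
    unfold pvLoopA pvLoopB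
    unfold pvSpanOK at hsp
    match hparse : pvParseSpan sp with
    | none => rw [hparse] at hsp; simp at hsp
    | some (s, e, lab) =>
      rw [hparse] at hsp
      simp only
      by_cases hlab : lab ≠ "TIME"
      · rw [if_pos hlab, if_pos hlab]
        have hivs : pvTimeIvs (sp :: rest) = pvTimeIvs rest := by
          simp only [pvTimeIvs, List.filterMap_cons, hparse]
          rw [if_neg (by intro h; exact hlab h)]
        rw [hivs] at hpw
        exact ih acc hb (fun x hx => hok x (List.mem_cons_of_mem _ hx)) hpw
      · push_neg at hlab
        rw [if_neg (not_not_intro hlab), if_neg (not_not_intro hlab)]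
        have hsp2 : (decide (lab ≠ "TIME") ||
            (decide (0 ≤ s) && decide (s < e) && decide (e ≤ n))) = true := hsp
        subst hlab
        simp at hsp2
        have hbnd : 0 ≤ s ∧ s < e ∧ e ≤ n := by omega
        rw [if_neg (not_not_intro hbnd), if_neg (not_not_intro hbnd)]
        have hivs : pvTimeIvs (sp :: rest) = (s, e) :: pvTimeIvs rest := by
          simp [pvTimeIvs, hparse]
        rw [hivs] at hpw
        have hdisj : ∀ q ∈ acc, e ≤ q.1 ∨ q.2 ≤ s := by
          intro q hq
          have := (List.pairwise_append.mp hpw).2.2 q hq (s, e) (by simp)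
          dsimp at this; omega
        rw [guard_agree n s e acc hbnd.1 hbnd.2.1 hbnd.2.2 hb]
        by_cases hov : acc.any (fun q => q.1 < e && s < q.2) = true
        · rw [if_pos hov, if_pos hov]; rfl
        · rw [Bool.not_eq_true] at hov
          rw [if_neg (by simp [hov]), if_neg (by simp [hov])]
          rw [fill_render n s e acc hbnd.1 hbnd.2.1 hbnd.2.2
            (fun q hq => (hb q hq).2.1) hdisj]
          apply ih
          · intro q hq
            rcases List.mem_append.mp hq with h | h
            · exact hb q h
            · simp at h; subst h; exact ⟨hbnd.1, hbnd.2.1, hbnd.2.2⟩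
          · exact fun x hx => hok x (List.mem_cons_of_mem _ hx)
          · rw [List.append_assoc]
            simpa using hpw

theorem pvRender_nil (n : Int) : pvRender n [] = PySem.List.pyRepeat ["O"] n := by
  rw [PySem.List.pyRepeat_singleton]
  simp [pvRender, pvClassify, List.map_const', PySem.List.length_pyRange_one]

-- ===== VERDICT (by name: the statement is the Claim_ definition above) =====
theorem char_bio_labels_spec : Claim_equal_char_bio_labels := by
  intro text spans _ hpre
  obtain ⟨hok, hpw⟩ := hpre
  unfold Spec_char_bio_labels char_bio_labels char_bio_labels_alt
  have h := loop_agree (PySem.Str.len text) spans [] (by simp) hok (by simpa using hpw)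
  rw [pvRender_nil] at h
  rw [h]
  cases pvLoopB (PySem.Str.len text) [] spans with
  | none => rfl
  | some acc => simp [pvRender]
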